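-- pv_equiv track=rewrite | github.com/stevenvitsofficial/advent-of-code | src/Day1/Elevator.py | MoveElevator
-- ===== SOURCE A (Python) =====
-- def MoveElevator(brackets):
--
--     floor = 0
--
--     for el in brackets:
--         if(el == '('):
--             floor = floor + 1
--         elif(el == ')'):
--             floor = floor - 1
--         else:
--             raise Exception('The input contained an invalid command character')
--
--     return floor
-- ===== SOURCE B (Python) =====
-- def MoveElevator(brackets):
--     if set(brackets) - {'(', ')'}:
--         raise Exception('The input contained an invalid command character')
--     return brackets.count('(') - brackets.count(')')
-- ===== Notes on version B (the rewrite author's own statement) =====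
-- stated objective: simpler
-- what changed: Replaced the fused accumulate-with-branch loop by a separate whole-string validation (set difference against the bracket alphabet) followed by two independent counting scans, returning count('(') - count(')').
import Mathlib
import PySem

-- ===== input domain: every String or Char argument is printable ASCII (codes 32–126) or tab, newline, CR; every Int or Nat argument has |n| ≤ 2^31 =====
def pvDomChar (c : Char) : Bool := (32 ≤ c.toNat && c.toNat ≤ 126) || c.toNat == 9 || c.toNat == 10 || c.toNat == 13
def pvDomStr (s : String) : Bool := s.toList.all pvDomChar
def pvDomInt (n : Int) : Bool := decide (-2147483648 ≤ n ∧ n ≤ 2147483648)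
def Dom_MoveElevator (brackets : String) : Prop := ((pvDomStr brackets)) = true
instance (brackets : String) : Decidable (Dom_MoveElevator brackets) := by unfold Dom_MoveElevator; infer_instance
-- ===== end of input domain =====

-- B separates validation (set difference) from computation (two counting scans); objective: simpler.

-- ===== PORT A =====
-- A's single loop: accumulator in Option Int, none = the raised Exception (excluded by Pre_).
def MoveElevator (brackets : String) : Int :=
  (brackets.toList.foldl
    (fun acc el => acc.bind (fun floor =>
      if el = '(' then some (floor + 1)
      else if el = ')' then some (floor - 1)
      else none))
    (some 0)).getD 0

-- ===== PORT B =====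
-- set(brackets) - {'(', ')'}  →  filter of the distinct-element set; nonempty = raise (excluded by Pre_).
def MoveElevator_alt (brackets : String) : Int :=
  if (PySem.Set.ofList brackets.toList).filter (fun c => c ≠ '(' ∧ c ≠ ')') ≠ [] then 0
  else (brackets.toList.count '(' : Int) - (brackets.toList.count ')' : Int)

-- ===== PRECONDITION & SPEC =====
-- Pre_ excludes exactly the inputs containing a non-bracket character, on which both A and B raise Exception.
def Pre_MoveElevator (brackets : String) : Prop :=
  brackets.toList.all (fun c => c = '(' ∨ c = ')') = true
instance (brackets : String) : Decidable (Pre_MoveElevator brackets) := by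
  unfold Pre_MoveElevator; infer_instance

def pvWitness_MoveElevator : String := "(()(()"

def Spec_MoveElevator (brackets : String) (out : Int) : Prop := out = MoveElevator_alt brackets
instance (brackets : String) (out : Int) : Decidable (Spec_MoveElevator brackets out) := by unfold Spec_MoveElevator; infer_instance

-- ===== CLAIM (what is proved, stated in full; the proofs are below) =====
def Claim_equal_MoveElevator : Prop := ∀ (brackets : String), Dom_MoveElevator brackets → Pre_MoveElevator brackets → Spec_MoveElevator brackets (MoveElevator brackets)

-- ===== LEMMAS AND PROOFS =====

-- A's loop on an all-bracket list computes count '(' minus count ')', shifted by the start accumulator.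
theorem pvAloop_eq (l : List Char) (f : Int)
    (h : ∀ c ∈ l, c = '(' ∨ c = ')') :
    l.foldl
      (fun acc el => acc.bind (fun floor =>
        if el = '(' then some (floor + 1)
        else if el = ')' then some (floor - 1)
        else none))
      (some f)
    = some (f + (l.count '(' : Int) - (l.count ')' : Int)) := by
  induction l generalizing f with
  | nil => simp
  | cons c t ih =>
    have hc := h c (List.mem_cons_self ..)
    have ht : ∀ x ∈ t, x = '(' ∨ x = ')' := fun x hx => h x (List.mem_cons_of_mem _ hx)
    rcases hc with hc | hc <;> subst hc <;>
      simp [List.foldl_cons, ih _ ht] <;> ring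

theorem pvBguard (brackets : String) (h : Pre_MoveElevator brackets) :
    (PySem.Set.ofList brackets.toList).filter (fun c => c ≠ '(' ∧ c ≠ ')') = [] := by
  rw [List.filter_eq_nil_iff]
  intro c hc
  have : c ∈ brackets.toList := (PySem.Set.mem_ofList ..).mp hc
  have := (List.all_eq_true.mp h) c this
  simp at this ⊢
  tauto

-- ===== VERDICT (by name: the statement is the Claim_ definition above) =====
theorem MoveElevator_spec : Claim_equal_MoveElevator := by
  intro brackets _ hpre
  unfold Spec_MoveElevator MoveElevator MoveElevator_alt
  have hall : ∀ c ∈ brackets.toList, c = '(' ∨ c = ')' := by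
    intro c hc
    have := (List.all_eq_true.mp hpre) c hc
    simpa using this
  rw [pvAloop_eq _ 0 hall, pvBguard brackets hpre]
  simp
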